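-- pv_equiv track=rewrite | github.com/nightjuggler/aoc | 2019/24.py | part1
-- ===== SOURCE A (Python) =====
-- def part1(bugs):
-- 	def is_bug(x, y):
-- 		n = sum(xy in bugs for xy in ((x+1,y), (x,y+1), (x-1,y), (x,y-1)))
-- 		return n == 1 or n == 2 and (x, y) not in bugs
--
-- 	ratings = set()
-- 	while not (rating := sum(2**(y*5+x) for x, y in bugs)) in ratings:
-- 		ratings.add(rating)
-- 		bugs = {(x, y)
-- 			for y in range(5)
-- 			for x in range(5)
-- 			if is_bug(x, y)}
-- 	return rating
-- ===== SOURCE B (Python) =====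
-- def part1(bugs):
--     # The 5x5 grid lives in the middle of a 7x7 bitboard (bit 7*(y+1)+(x+1) for
--     # cell (x,y)): the one-cell halo absorbs row wrap-around of the shifts, so
--     # one carry-save-adder step serves every generation with no edge masks.
--     FULL = (1 << 49) - 1
--     CENTER = 0b0000000_0111110_0111110_0111110_0111110_0111110_0000000
--
--     def step(b):
--         l = b >> 1
--         r = b << 1
--         u = b >> 7
--         d = b << 7
--         p = l ^ r
--         q = u ^ d
--         odd = p ^ q
--         c1 = l & r
--         c2 = u & d
--         c3 = p & q
--         one = odd & ((c1 | c2 | c3) ^ FULL)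
--         two = (odd ^ FULL) & (c1 ^ c2 ^ c3)
--         return (one | (two & (b ^ FULL))) & CENTER
--
--     def rating(b):
--         return sum(1 << i for i in range(25) if b >> (7 * (i // 5) + i % 5 + 8) & 1)
--
--     b = 0
--     for x, y in bugs:
--         # bugs beyond the halo can never touch the grid
--         if -1 <= x <= 5 and -1 <= y <= 5:
--             b |= 1 << (7 * (y + 1) + x + 1)
--     seen = set()
--     r = sum(1 << (5 * y + x) for x, y in bugs)
--     while r not in seen:
--         seen.add(r)
--         b = step(b)
--         r = rating(b)
--     return r
-- ===== Notes on version B (the rewrite author's own statement) =====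
-- stated objective: alternative
-- what changed: B replaces the set-of-coordinate-tuples simulation by a padded 7x7 bitboard: every generation is computed for all 25 cells at once by a carry-save adder over four shifted copies of the board (boolean algebra, no per-cell neighbour loop and no membership scans), the one-cell halo absorbs row wrap-around and off-grid input bugs, and the rating is extracted from the board bitwise.
-- outside the precondition, e.g. on part1({(-1, 0)}): A returns 34, B raises ValueError
import Mathlib
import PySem

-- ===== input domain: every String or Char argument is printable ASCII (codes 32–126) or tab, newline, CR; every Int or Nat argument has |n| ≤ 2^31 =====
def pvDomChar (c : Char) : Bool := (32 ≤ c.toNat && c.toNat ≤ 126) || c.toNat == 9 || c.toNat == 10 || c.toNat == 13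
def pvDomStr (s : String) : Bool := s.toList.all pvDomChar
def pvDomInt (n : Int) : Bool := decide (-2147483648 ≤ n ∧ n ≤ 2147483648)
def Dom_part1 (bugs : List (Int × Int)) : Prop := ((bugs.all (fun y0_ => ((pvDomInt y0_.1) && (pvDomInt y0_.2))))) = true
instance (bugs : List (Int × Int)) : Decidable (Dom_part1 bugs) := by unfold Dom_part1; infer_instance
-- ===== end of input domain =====

-- B replaces A's set-of-coordinate-tuples simulation by a padded 7x7 bitboard: one
-- carry-save-adder step computes all 25 neighbour counts at once (no per-cell loop,
-- no membership scans), and the rating is extracted from the board bitwise.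

-- ===== PORT A =====
-- inner helper is_bug: n = number of the four orthogonal neighbours present in bugs
def part1IsBug (bugs : List (Int × Int)) (x y : Int) : Bool :=
  let n : Int :=
    ([(x + 1, y), (x, y + 1), (x - 1, y), (x, y - 1)] : List (Int × Int)).foldl
      (fun s xy => s + (if xy ∈ bugs then 1 else 0)) 0
  n == 1 || (n == 2 && !(decide ((x, y) ∈ bugs)))

-- rating = sum(2**(y*5+x) for x, y in bugs); exact when every y*5+x ≥ 0 (guaranteed
-- inside Pre_part1 — for a negative exponent Python's 2** yields a float, which the
-- Int port cannot represent, so Pre_part1 excludes those inputs)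
def part1Rating (bugs : List (Int × Int)) : Int :=
  bugs.foldl (fun s p => s + 2 ^ (p.2 * 5 + p.1).toNat) 0

-- the set comprehension {(x, y) for y in range(5) for x in range(5) if is_bug(x, y)}
def part1Next (bugs : List (Int × Int)) : List (Int × Int) :=
  PySem.Set.ofList
    ((PySem.List.pyRange 0 5 1).flatMap fun y =>
      ((PySem.List.pyRange 0 5 1).filter fun x => part1IsBug bugs x y).map fun x => (x, y))

-- the while loop, with fuel 2^25+2: A's loop adds a new rating to `ratings` each pass,
-- and after the first pass every rating is a 25-bit value, so a repeat occurs within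
-- 2^25+2 passes and the fuel is never exhausted (fuel only makes the recursion total)
def part1Loop : Nat → PySem.Set Int → List (Int × Int) → Int
  | 0, _, _ => 0
  | fuel + 1, ratings, bugs =>
    let rating := part1Rating bugs
    if PySem.Set.contains ratings rating then rating
    else part1Loop fuel (PySem.Set.add ratings rating) (part1Next bugs)

def part1 (bugs : List (Int × Int)) : Int :=
  part1Loop 33554434 PySem.Set.empty bugs

-- ===== PORT B =====
-- Source B's step(b): the carry-save-adder generation step on the 7x7 board
-- (FULL = (1<<49)-1 and CENTER = Source B's central-5x5 mask, as decimal numerals)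
def step7 (b : Nat) : Nat :=
  let l := b >>> 1
  let r := b <<< 1
  let u := b >>> 7
  let d := b <<< 7
  let p := l ^^^ r
  let q := u ^^^ d
  let odd := p ^^^ q
  let c1 := l &&& r
  let c2 := u &&& d
  let c3 := p &&& q
  let one := odd &&& ((c1 ||| c2 ||| c3) ^^^ 562949953421311)
  let two := (odd ^^^ 562949953421311) &&& (c1 ^^^ c2 ^^^ c3)
  (one ||| (two &&& (b ^^^ 562949953421311))) &&& 2147077824256

-- Source B's rating(b): sum(1 << i for i in range(25) if b >> (7*(i//5) + i%5 + 8) & 1)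
def rating7 (b : Nat) : Nat :=
  (((List.range 25).filter fun i => (b >>> (7 * (i / 5) + i % 5 + 8)) &&& 1 != 0).foldl
    (fun s i => s + (1 <<< i)) 0)

-- the board-building loop: b |= 1 << (7*(y+1) + x+1) for bugs on the padded board
def altBoard (bugs : List (Int × Int)) : Nat :=
  bugs.foldl
    (fun b p =>
      if (-1 : Int) ≤ p.1 ∧ p.1 ≤ (5 : Int) ∧ (-1 : Int) ≤ p.2 ∧ p.2 ≤ (5 : Int) then
        b ||| (1 <<< (7 * (p.2 + 1) + (p.1 + 1)).toNat)
      else b) 0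

-- r = sum(1 << (5*y + x) for x, y in bugs); Python raises ValueError on a negative
-- shift count, so Pre_part1 keeps every 5*y+x nonnegative and .toNat is exact there
def altR0 (bugs : List (Int × Int)) : Nat :=
  bugs.foldl (fun s p => s + (1 <<< (5 * p.2 + p.1).toNat)) 0

-- Source B's while loop; fuel as in A's port (never exhausted; it only makes it total)
def altLoop : Nat → PySem.Set Nat → Nat → Nat → Nat
  | 0, _, _, _ => 0
  | fuel + 1, seen, b, r =>
    if PySem.Set.contains seen r then r
    else
      let b' := step7 b
      altLoop fuel (PySem.Set.add seen r) b' (rating7 b')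

def part1_alt (bugs : List (Int × Int)) : Int :=
  (altLoop 33554434 PySem.Set.empty (altBoard bugs) (altR0 bugs) : Nat)

-- ===== PRECONDITION & SPEC =====
-- Pre_part1 excludes only bugs with 5*y+x < 0: there A's rating 2**(y*5+x) is a
-- Python float (not representable in the Int port) and B's 1 << (5*y+x) raises
-- ValueError.
def Pre_part1 (bugs : List (Int × Int)) : Prop :=
  ∀ p ∈ bugs, 0 ≤ 5 * p.2 + p.1

instance (bugs : List (Int × Int)) : Decidable (Pre_part1 bugs) := by
  unfold Pre_part1; infer_instance

def pvWitness_part1 : (List (Int × Int)) := [(0, 0), (1, 1), (4, 3)]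

def Spec_part1 (bugs : List (Int × Int)) (out : Int) : Prop := out = part1_alt bugs
instance (bugs : List (Int × Int)) (out : Int) : Decidable (Spec_part1 bugs out) := by
  unfold Spec_part1; infer_instance

-- ===== CLAIM (what is proved, stated in full; the proofs are below) =====
def Claim_equal_part1 : Prop :=
  ∀ (bugs : List (Int × Int)), Dom_part1 bugs → Pre_part1 bugs → Spec_part1 bugs (part1 bugs)

-- ===== LEMMAS AND PROOFS =====
-- the coupling relation: for every cell of the padded board, the board bit equals
-- membership of that cell in A's current bug collection
def BRep (bugs : List (Int × Int)) (b : Nat) : Prop :=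
  ∀ x y : Int, -1 ≤ x → x ≤ 5 → -1 ≤ y → y ≤ 5 →
    b.testBit (7 * (y + 1) + (x + 1)).toNat = decide ((x, y) ∈ bugs)

-- the invariant after a step: a duplicate-free in-grid bug list, coupled to a board
-- whose set bits all lie in the central 5x5
def NState (bugs : List (Int × Int)) (b : Nat) : Prop :=
  bugs.Nodup ∧
  (∀ p ∈ bugs, 0 ≤ p.1 ∧ p.1 < 5 ∧ 0 ≤ p.2 ∧ p.2 < 5) ∧
  BRep bugs b ∧
  (∀ k : Nat, b.testBit k = true → 1 ≤ k % 7 ∧ k % 7 ≤ 5 ∧ 7 ≤ k ∧ k < 42)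

-- the per-cell boolean the carry-save adder computes: e,w,u,v the four neighbour
-- bits, c the cell's own bit
def ruleBits (e w u v c : Bool) : Bool :=
  let p := e ^^ w
  let q := u ^^ v
  let odd := p ^^ q
  let c1 := e && w
  let c2 := u && v
  let c3 := p && q
  (odd && !(c1 || c2 || c3)) || (!odd && ((c1 ^^ c2) ^^ c3) && !c)

-- bits of Source B's two mask constants
theorem centerBit (k : Nat) :
    (2147077824256 : Nat).testBit k =
      decide (1 ≤ k % 7 ∧ k % 7 ≤ 5 ∧ 7 ≤ k ∧ k < 42) := by
  by_cases h : k < 49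
  · interval_cases k <;> decide
  · have hlt : (2147077824256 : Nat) < 2 ^ k :=
      lt_of_lt_of_le (show (2147077824256 : Nat) < 2 ^ 49 by norm_num)
        (Nat.pow_le_pow_right (by norm_num) (by omega))
    rw [Nat.testBit_lt_two_pow hlt]
    have : ¬(1 ≤ k % 7 ∧ k % 7 ≤ 5 ∧ 7 ≤ k ∧ k < 42) := by omega
    simp [this]

theorem fullBit (k : Nat) :
    (562949953421311 : Nat).testBit k = decide (k < 49) := by
  by_cases h : k < 49
  · interval_cases k <;> decide
  · have hlt : (562949953421311 : Nat) < 2 ^ k :=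
      lt_of_lt_of_le (show (562949953421311 : Nat) < 2 ^ 49 by norm_num)
        (Nat.pow_le_pow_right (by norm_num) (by omega))
    rw [Nat.testBit_lt_two_pow hlt]
    simp [h]

-- bitwise characterisation of one carry-save step, central bits
theorem testBit_step7 (b : Nat) (k : Nat)
    (h1 : 1 ≤ k % 7) (h2 : k % 7 ≤ 5) (h3 : 7 ≤ k) (h4 : k < 42) :
    (step7 b).testBit k =
      ruleBits (b.testBit (k + 1)) (b.testBit (k - 1))
        (b.testBit (k + 7)) (b.testBit (k - 7)) (b.testBit k) := by
  have hc : (2147077824256 : Nat).testBit k = true := by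
    rw [centerBit]; simp; omega
  have hf : ∀ j : Nat, j < 49 → (562949953421311 : Nat).testBit j = true := by
    intro j hj; rw [fullBit]; simp [hj]
  unfold step7 ruleBits
  simp only [Nat.testBit_and, Nat.testBit_or, Nat.testBit_xor, Nat.testBit_shiftLeft,
    Nat.testBit_shiftRight, hc, hf k (by omega), Bool.and_true,
    show decide (k ≥ 1) = true from by simp; omega,
    show decide (k ≥ 7) = true from by simp; omega, Bool.true_and,
    show (1 + k) = (k + 1) from by omega, show (7 + k) = (k + 7) from by omega]
  cases b.testBit (k + 1) <;> cases b.testBit (k - 1) <;> cases b.testBit (k + 7) <;>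
    cases b.testBit (k - 7) <;> cases b.testBit k <;> simp

-- non-central bits of the step are clear
theorem step7_notCentral (b : Nat) (k : Nat)
    (h : ¬(1 ≤ k % 7 ∧ k % 7 ≤ 5 ∧ 7 ≤ k ∧ k < 42)) :
    (step7 b).testBit k = false := by
  unfold step7
  simp only [Nat.testBit_and, centerBit, decide_eq_false h, Bool.and_false]

-- A's per-cell count agrees with the adder's per-cell boolean, under the coupling
theorem isBug_eq_rule (bugs : List (Int × Int)) (b : Nat) (hBRep : BRep bugs b)
    (x y : Int) (hx0 : 0 ≤ x) (hx4 : x < 5) (hy0 : 0 ≤ y) (hy4 : y < 5) :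
    part1IsBug bugs x y =
      ruleBits (b.testBit ((7 * (y + 1) + (x + 1)).toNat + 1))
        (b.testBit ((7 * (y + 1) + (x + 1)).toNat - 1))
        (b.testBit ((7 * (y + 1) + (x + 1)).toNat + 7))
        (b.testBit ((7 * (y + 1) + (x + 1)).toNat - 7))
        (b.testBit ((7 * (y + 1) + (x + 1)).toNat)) := by
  have e1 : (if (x + 1, y) ∈ bugs then (1 : Int) else 0) =
      (if b.testBit ((7 * (y + 1) + (x + 1)).toNat + 1) = true then 1 else 0) := by
    rw [show (7 * (y + 1) + (x + 1)).toNat + 1 = (7 * (y + 1) + ((x + 1) + 1)).toNat by omega,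
      hBRep (x + 1) y (by omega) (by omega) (by omega) (by omega)]
    by_cases hm : (x + 1, y) ∈ bugs <;> simp [hm]
  have e2 : (if (x, y + 1) ∈ bugs then (1 : Int) else 0) =
      (if b.testBit ((7 * (y + 1) + (x + 1)).toNat + 7) = true then 1 else 0) := by
    rw [show (7 * (y + 1) + (x + 1)).toNat + 7 = (7 * ((y + 1) + 1) + (x + 1)).toNat by omega,
      hBRep x (y + 1) (by omega) (by omega) (by omega) (by omega)]
    by_cases hm : (x, y + 1) ∈ bugs <;> simp [hm]
  have e3 : (if (x - 1, y) ∈ bugs then (1 : Int) else 0) =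
      (if b.testBit ((7 * (y + 1) + (x + 1)).toNat - 1) = true then 1 else 0) := by
    rw [show (7 * (y + 1) + (x + 1)).toNat - 1 = (7 * (y + 1) + ((x - 1) + 1)).toNat by omega,
      hBRep (x - 1) y (by omega) (by omega) (by omega) (by omega)]
    by_cases hm : (x - 1, y) ∈ bugs <;> simp [hm]
  have e4 : (if (x, y - 1) ∈ bugs then (1 : Int) else 0) =
      (if b.testBit ((7 * (y + 1) + (x + 1)).toNat - 7) = true then 1 else 0) := by
    rw [show (7 * (y + 1) + (x + 1)).toNat - 7 = (7 * ((y - 1) + 1) + (x + 1)).toNat by omega,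
      hBRep x (y - 1) (by omega) (by omega) (by omega) (by omega)]
    by_cases hm : (x, y - 1) ∈ bugs <;> simp [hm]
  have ec : decide ((x, y) ∈ bugs) = b.testBit ((7 * (y + 1) + (x + 1)).toNat) :=
    (hBRep x y (by omega) (by omega) (by omega) (by omega)).symm
  unfold part1IsBug
  simp only [List.foldl_cons, List.foldl_nil, zero_add, e1, e2, e3, e4, ec]
  generalize b.testBit ((7 * (y + 1) + (x + 1)).toNat + 1) = E
  generalize b.testBit ((7 * (y + 1) + (x + 1)).toNat + 7) = U
  generalize b.testBit ((7 * (y + 1) + (x + 1)).toNat - 1) = W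
  generalize b.testBit ((7 * (y + 1) + (x + 1)).toNat - 7) = V
  generalize b.testBit ((7 * (y + 1) + (x + 1)).toNat) = C
  cases E <;> cases U <;> cases W <;> cases V <;> cases C <;> decide

-- a freshly set bit turns ||| into +
theorem or_two_pow_of_testBit_false :
    ∀ (i a : Nat), a.testBit i = false → a ||| 2 ^ i = a + 2 ^ i := by
  intro i
  induction i with
  | zero =>
    intro a h
    have ha : a % 2 = 0 := by simpa [Nat.testBit_zero] using h
    obtain ⟨k, rfl⟩ : ∃ k, a = 2 * k := ⟨a / 2, by omega⟩
    have : 2 * k ||| 1 = 2 * k + 1 := by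
      have := Nat.lor_bit false k true 0
      simpa [Nat.bit] using this
    simpa using this
  | succ i ih =>
    intro a h
    have hbit : Nat.bit (a.testBit 0) (a >>> 1) = a := Nat.bit_testBit_zero_shiftRight_one a
    have h1 : (a >>> 1).testBit i = false := by
      rw [Nat.testBit_succ] at h; simpa [Nat.shiftRight_one] using h
    have h2 : (a >>> 1) ||| 2 ^ i = (a >>> 1) + 2 ^ i := ih _ h1
    have h3 : (2 : Nat) ^ (i + 1) = Nat.bit false (2 ^ i) := by simp [Nat.bit, Nat.pow_succ]; ring
    have ha2 : a = 2 * (a >>> 1) + (a.testBit 0).toNat := by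
      have := hbit; rcases hb : a.testBit 0 <;> rw [hb] at this <;>
        simp [Nat.bit, Nat.shiftRight_one] at this ⊢ <;> omega
    calc a ||| 2 ^ (i + 1)
        = Nat.bit (a.testBit 0) (a >>> 1) ||| Nat.bit false (2 ^ i) := by rw [hbit, h3]
      _ = Nat.bit (a.testBit 0 || false) ((a >>> 1) ||| 2 ^ i) := Nat.lor_bit ..
      _ = Nat.bit (a.testBit 0) ((a >>> 1) + 2 ^ i) := by rw [h2]; simp
      _ = a + 2 ^ (i + 1) := by
          rcases hb : a.testBit 0 <;> rw [hb] at ha2 <;>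
            simp [Nat.bit, Nat.pow_succ] at ha2 ⊢ <;> omega

-- characterisation of an or-fold over a list of bit indices
theorem testBit_orFold (l : List Nat) (s k : Nat) :
    (l.foldl (fun a j => a ||| 2 ^ j) s).testBit k = (s.testBit k || l.contains k) := by
  induction l generalizing s with
  | nil => simp
  | cons j l ih =>
    simp only [List.foldl_cons, ih, Nat.testBit_lor, Nat.testBit_two_pow, List.contains_cons]
    by_cases h : j = k
    · subst h; cases s.testBit j <;> simp
    · have hb : (k == j) = false := by simp [Ne.symm h]
      simp [h, hb]

-- an or-fold over fresh, pairwise distinct bits is the corresponding sum-fold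
theorem orFold_eq_sumFold (l : List Nat) (s : Nat) (hn : l.Nodup)
    (h : ∀ j ∈ l, s.testBit j = false) :
    l.foldl (fun a j => a ||| 2 ^ j) s = l.foldl (fun a j => a + 2 ^ j) s := by
  induction l generalizing s with
  | nil => rfl
  | cons j l ih =>
    simp only [List.foldl_cons]
    rw [or_two_pow_of_testBit_false j s (h j (by simp))]
    apply ih (s := s + 2 ^ j) (List.Nodup.of_cons hn)
    intro j' hj'
    rw [← or_two_pow_of_testBit_false j s (h j (by simp)), Nat.testBit_lor,
      h j' (by simp [hj']), Nat.testBit_two_pow]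
    simp
    rintro rfl
    exact (List.nodup_cons.mp hn).1 hj'

-- cast a Nat sum-fold to the Int sum-fold
theorem sumFold_cast (l : List Nat) (s : Nat) :
    ((l.foldl (fun a j => a + 2 ^ j) s : Nat) : Int) = l.foldl (fun a j => a + 2 ^ j) (s : Int) := by
  induction l generalizing s with
  | nil => rfl
  | cons j l ih => simp only [List.foldl_cons, ih]; push_cast; ring_nf

-- `x & 1 != 0` is the bit test
theorem and_one_ne (b e : Nat) : ((b >>> e) &&& 1 != 0) = b.testBit e := by
  simp [Nat.testBit, Nat.and_comm]

-- bitwise characterisation of the rating extraction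
theorem testBit_rating7 (b : Nat) (k : Nat) :
    (rating7 b).testBit k = (decide (k < 25) && b.testBit (7 * (k / 5) + k % 5 + 8)) := by
  have hform : rating7 b =
      ((List.range 25).filter fun i => (b >>> (7 * (i / 5) + i % 5 + 8)) &&& 1 != 0).foldl
        (fun s i => s + 2 ^ i) 0 := by
    unfold rating7
    congr 1
    funext s i
    rw [Nat.one_shiftLeft]
  have hnd : ((List.range 25).filter fun i =>
      (b >>> (7 * (i / 5) + i % 5 + 8)) &&& 1 != 0).Nodup :=
    List.Nodup.filter _ (List.nodup_range)
  rw [hform, ← orFold_eq_sumFold _ _ hnd (by simp), testBit_orFold]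
  simp only [Nat.zero_testBit, Bool.false_or]
  rw [Bool.eq_iff_iff]
  simp only [List.contains_iff_mem, List.mem_filter, List.mem_range, Bool.and_eq_true,
    decide_eq_true_eq]
  rw [and_one_ne]

-- A's rating equals the extracted rating of a coupled post-step board
theorem rating_eq (bugs : List (Int × Int)) (b : Nat) (h : NState bugs b) :
    part1Rating bugs = (rating7 b : Int) := by
  obtain ⟨hn, hg, hBRep, _⟩ := h
  have hLnd : (bugs.map fun p => (p.2 * 5 + p.1).toNat).Nodup := by
    refine List.Nodup.map_on ?_ hn
    intro p hp q hq hpq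
    obtain ⟨a1, a2, a3, a4⟩ := hg p hp
    obtain ⟨b1, b2, b3, b4⟩ := hg q hq
    have : p.1 = q.1 ∧ p.2 = q.2 := by omega
    exact Prod.ext this.1 this.2
  have hstate : rating7 b =
      (bugs.map fun p => (p.2 * 5 + p.1).toNat).foldl (fun a j => a ||| 2 ^ j) 0 := by
    apply Nat.eq_of_testBit_eq
    intro k
    rw [testBit_orFold, testBit_rating7]
    simp only [Nat.zero_testBit, Bool.false_or]
    by_cases hk : k < 25
    · have hx : b.testBit (7 * (k / 5) + k % 5 + 8) =
          decide ((((k % 5 : Nat) : Int), ((k / 5 : Nat) : Int)) ∈ bugs) := by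
        rw [← hBRep ((k % 5 : Nat) : Int) ((k / 5 : Nat) : Int)
          (by omega) (by omega) (by omega) (by omega)]
        congr 1
        omega
      simp only [hk, decide_true, Bool.true_and, hx]
      rw [Bool.eq_iff_iff]
      simp only [decide_eq_true_eq, List.contains_iff_mem, List.mem_map]
      constructor
      · intro hm
        exact ⟨_, hm, by omega⟩
      · rintro ⟨p, hp, hpk⟩
        obtain ⟨a1, a2, a3, a4⟩ := hg p hp
        have : p.1 = ((k % 5 : Nat) : Int) ∧ p.2 = ((k / 5 : Nat) : Int) := by omega
        rwa [show (((k % 5 : Nat) : Int), ((k / 5 : Nat) : Int)) = p from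
          Prod.ext this.1.symm this.2.symm]
    · simp only [show decide (k < 25) = false from by simp [hk], Bool.false_and]
      rw [Bool.eq_iff_iff]
      simp only [List.contains_iff_mem, List.mem_map]
      constructor
      · intro h; exact absurd h (by simp)
      · rintro ⟨p, hp, hpk⟩
        obtain ⟨a1, a2, a3, a4⟩ := hg p hp
        omega
  have hrate : part1Rating bugs =
      (bugs.map fun p => (p.2 * 5 + p.1).toNat).foldl (fun a j => a + 2 ^ j) ((0 : Nat) : Int) := by
    unfold part1Rating
    rw [List.foldl_map]
    norm_num
  rw [hrate, ← sumFold_cast, ← orFold_eq_sumFold _ _ hLnd (by simp), ← hstate]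

-- A's first rating equals Source B's r, by casting the sum of shifts
theorem rating_cast (bugs : List (Int × Int)) :
    part1Rating bugs = ((altR0 bugs : Nat) : Int) := by
  unfold part1Rating altR0
  rw [show (fun (s : Nat) (p : Int × Int) => s + (1 <<< (5 * p.2 + p.1).toNat)) =
      (fun (s : Nat) (p : Int × Int) => s + 2 ^ (p.2 * 5 + p.1).toNat) from by
    funext s p
    rw [Nat.one_shiftLeft]
    congr 2
    omega]
  suffices h : ∀ s : Nat,
      ((bugs.foldl (fun s p => s + 2 ^ (p.2 * 5 + p.1).toNat) s : Nat) : Int) =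
        bugs.foldl (fun s p => s + 2 ^ (p.2 * 5 + p.1).toNat) (s : Int) by
    exact (h 0).symm
  induction bugs with
  | nil => intro s; rfl
  | cons p l ih =>
    intro s
    simp only [List.foldl_cons]
    rw [ih (s + 2 ^ (p.2 * 5 + p.1).toNat)]
    congr 1

-- membership in A's next-set comprehension
theorem mem_part1Next (bugs : List (Int × Int)) (a b : Int) :
    (a, b) ∈ part1Next bugs ↔
      (0 ≤ a ∧ a < 5 ∧ 0 ≤ b ∧ b < 5 ∧ part1IsBug bugs a b = true) := by
  unfold part1Next
  rw [PySem.Set.mem_ofList]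
  have hr : PySem.List.pyRange 0 5 1 = [0, 1, 2, 3, 4] := by decide
  rw [hr]
  simp only [List.mem_flatMap, List.mem_map, List.mem_filter]
  constructor
  · rintro ⟨y, hy, x, ⟨hx, hbug⟩, hxy⟩
    obtain ⟨rfl, rfl⟩ : x = a ∧ y = b := by
      exact ⟨congrArg Prod.fst hxy, congrArg Prod.snd hxy⟩
    fin_cases hy <;> fin_cases hx <;> simp_all
  · rintro ⟨h1, h2, h3, h4, hbug⟩
    refine ⟨b, ?_, a, ⟨?_, hbug⟩, rfl⟩ <;> · simp; omega

theorem part1Next_nodup (bugs : List (Int × Int)) : (part1Next bugs).Nodup :=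
  PySem.Set.nodup_ofList _

-- the input board is coupled to the raw bug collection (no precondition needed)
theorem rep_init (bugs : List (Int × Int)) : BRep bugs (altBoard bugs) := by
  have hb : altBoard bugs =
      ((bugs.filter fun p =>
          decide ((-1 : Int) ≤ p.1 ∧ p.1 ≤ (5 : Int) ∧ (-1 : Int) ≤ p.2 ∧ p.2 ≤ (5 : Int))).map
        fun p => (7 * (p.2 + 1) + (p.1 + 1)).toNat).foldl (fun a j => a ||| 2 ^ j) 0 := by
    unfold altBoard
    rw [List.foldl_map, List.foldl_filter]
    congr 1
    funext a p
    rw [Nat.one_shiftLeft]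
    by_cases h : (-1 : Int) ≤ p.1 ∧ p.1 ≤ (5 : Int) ∧ (-1 : Int) ≤ p.2 ∧ p.2 ≤ (5 : Int)
    · simp [h]
    · simp [h]
  intro x y hx1 hx2 hy1 hy2
  rw [hb, testBit_orFold]
  simp only [Nat.zero_testBit, Bool.false_or]
  rw [Bool.eq_iff_iff]
  simp only [List.contains_iff_mem, List.mem_map, List.mem_filter, decide_eq_true_eq]
  constructor
  · rintro ⟨p, ⟨hp, b1, b2, b3, b4⟩, hpk⟩
    have : p.1 = x ∧ p.2 = y := by omega
    rwa [show (x, y) = p from Prod.ext this.1.symm this.2.symm]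
  · intro hm
    exact ⟨(x, y), ⟨hm, by omega, by omega, by omega, by omega⟩, rfl⟩

-- one step preserves the coupling and establishes the post-step invariant
theorem step_next (bugs : List (Int × Int)) (b : Nat) (hBRep : BRep bugs b) :
    NState (part1Next bugs) (step7 b) := by
  refine ⟨part1Next_nodup bugs, ?_, ?_, ?_⟩
  · intro p hp
    have := (mem_part1Next bugs p.1 p.2).mp (by simpa using hp)
    exact ⟨this.1, this.2.1, this.2.2.1, this.2.2.2.1⟩
  · intro x y hx1 hx2 hy1 hy2
    by_cases hg : 0 ≤ x ∧ x < 5 ∧ 0 ≤ y ∧ y < 5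
    · obtain ⟨g1, g2, g3, g4⟩ := hg
      set k := (7 * (y + 1) + (x + 1)).toNat with hkdef
      have hk1 : 1 ≤ k % 7 := by omega
      have hk2 : k % 7 ≤ 5 := by omega
      have hk3 : 7 ≤ k := by omega
      have hk4 : k < 42 := by omega
      rw [testBit_step7 b k hk1 hk2 hk3 hk4, ← isBug_eq_rule bugs b hBRep x y g1 g2 g3 g4]
      rw [Bool.eq_iff_iff]
      simp only [decide_eq_true_eq, mem_part1Next]
      tauto
    · rw [step7_notCentral b _ (by omega)]
      have : (x, y) ∉ part1Next bugs := by
        intro hc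
        have := (mem_part1Next bugs x y).mp hc
        omega
      simp [this]
  · intro k hk
    by_contra hc
    rw [step7_notCentral b k hc] at hk
    exact Bool.false_ne_true hk

theorem contains_map_natCast (seen : List Nat) (g : Nat) :
    (List.map (fun (n : Nat) => (n : Int)) seen).contains ((g : Nat) : Int) = seen.contains g := by
  rw [Bool.eq_iff_iff]
  simp only [List.contains_iff_mem, List.mem_map]
  constructor
  · rintro ⟨m, hm, he⟩
    rwa [show m = g from by exact_mod_cast he] at hm
  · intro hm
    exact ⟨g, hm, rfl⟩

theorem map_add_natCast (seen : List Nat) (g : Nat) :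
    List.map (fun (n : Nat) => (n : Int)) (PySem.Set.add seen g) =
      PySem.Set.add (List.map (fun (n : Nat) => (n : Int)) seen) ((g : Nat) : Int) := by
  by_cases hm : g ∈ seen
  · rw [PySem.Set.add_of_mem hm,
      PySem.Set.add_of_mem (List.mem_map.mpr ⟨g, hm, rfl⟩)]
  · have hm' : ((g : Nat) : Int) ∉ List.map (fun (n : Nat) => (n : Int)) seen := by
      intro hc
      obtain ⟨m, hmm, he⟩ := List.mem_map.mp hc
      rw [show m = g from by exact_mod_cast he] at hmm
      exact hm hmm
    rw [PySem.Set.add_of_not_mem hm, PySem.Set.add_of_not_mem hm', List.map_append]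
    rfl

-- the two loops run in lockstep: the board is coupled to A's bug collection and
-- the carried rating equals A's rating of it
theorem loop_eq (fuel : Nat) (ratings : PySem.Set Int) (seen : PySem.Set Nat)
    (bugs : List (Int × Int)) (b r : Nat) (hBRep : BRep bugs b)
    (hr : part1Rating bugs = (r : Int))
    (hmap : ratings = List.map (fun (n : Nat) => (n : Int)) seen) :
    part1Loop fuel ratings bugs = ((altLoop fuel seen b r : Nat) : Int) := by
  induction fuel generalizing ratings seen bugs b r with
  | zero => simp [part1Loop, altLoop]
  | succ f ih =>
    subst hmap
    simp only [part1Loop, altLoop, PySem.Set.contains_eq_listContains]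
    rw [hr]
    simp only [contains_map_natCast]
    split_ifs with hcond
    · rfl
    · exact ih _ _ _ _ _ ((step_next bugs b hBRep).2.2.1)
        (rating_eq _ _ (step_next bugs b hBRep)) (map_add_natCast seen r).symm

-- ===== VERDICT (by name: the statement is the Claim_ definition above) =====
theorem part1_spec : Claim_equal_part1 := by
  intro bugs _ _
  unfold Spec_part1 part1 part1_alt
  exact loop_eq 33554434 PySem.Set.empty PySem.Set.empty bugs (altBoard bugs) (altR0 bugs)
    (rep_init bugs) (rating_cast bugs) rfl
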